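-- pv_equiv track=rewrite | github.com/pypi-data/pypi-mirror-404 | packages/cde-render/cde_render-4.4.0-py3-none-any.whl/cde_render/common.py | generate_filesafe_shortnames
-- ===== SOURCE A (Python) =====
-- FILENAME_SANITIZE_MAP = str.maketrans({x: "_" for x in '/\\?%*:|"<> '})
--
-- def sanitize_filename(name: str) -> str:
--     """
--     Helper function to sanitize filenames (strip forbidden and problematic characters).
--
--     :param name: The unsafe name
--     :return: A sanitized version of the name to be used as filename
--     """
--     return name.translate(FILENAME_SANITIZE_MAP)
--
-- def generate_filesafe_shortnames(data: dict[int, str]) -> dict[int, str]: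
--     """Generate a filesafe shortname for each element of the given id to shortname mapping.
--
--     It uses sanitize_filename() to transform each shortname into a filesafe suffix.
--     Afterwards, it appends the corresponding id to all ambiguous names, if any.
--
--     It returns a mapping of ids to filesafe suffixes.
--     """
--     result = {id_: sanitize_filename(shortname) for id_, shortname in data.items()}
--
--     # Find ambiguous suffixes
--     reverse_result: dict[str, int] = {}
--     ambiguous_ids = set()
--     for id_, suffix in result.items():
--         if suffix in reverse_result:
--             ambiguous_ids.add(reverse_result[suffix])
--             ambiguous_ids.add(id_)
--         reverse_result[suffix] = id_
--
--     # Add part id to parts with ambiguous suffix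
--     for id_ in ambiguous_ids:
--         result[id_] += f"_{id_}"
--
--     return result
-- ===== SOURCE B (Python) =====
-- FILENAME_SANITIZE_MAP = str.maketrans({x: "_" for x in '/\\?%*:|"<> '})
--
--
-- def generate_filesafe_shortnames(data: dict[int, str]) -> dict[int, str]:
--     """Sort-then-scan rewrite: sanitize, sort the pairs by suffix, find duplicate
--     suffixes as adjacent equal neighbours in the sorted order, then rebuild the
--     mapping appending the id to every pair whose id was flagged."""
--     items = [(id_, shortname.translate(FILENAME_SANITIZE_MAP))
--              for id_, shortname in data.items()]
--     order = sorted(items, key=lambda p: p[1])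
--     dup_ids = set()
--     for (i1, s1), (i2, s2) in zip(order, order[1:]):
--         if s1 == s2:
--             dup_ids.add(i1)
--             dup_ids.add(i2)
--     return {id_: (f"{suffix}_{id_}" if id_ in dup_ids else suffix)
--             for id_, suffix in items}
-- ===== Notes on version B (the rewrite author's own statement) =====
-- stated objective: alternative
-- what changed: Replaces A's on-the-fly collision detection (reverse suffix->id map plus an ambiguous-id set, then in-place mutation of the result) by sorting the sanitized pairs by suffix, flagging duplicate suffixes as adjacent equal neighbours in the sorted order, and rebuilding the mapping in one comprehension.
import Mathlib
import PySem

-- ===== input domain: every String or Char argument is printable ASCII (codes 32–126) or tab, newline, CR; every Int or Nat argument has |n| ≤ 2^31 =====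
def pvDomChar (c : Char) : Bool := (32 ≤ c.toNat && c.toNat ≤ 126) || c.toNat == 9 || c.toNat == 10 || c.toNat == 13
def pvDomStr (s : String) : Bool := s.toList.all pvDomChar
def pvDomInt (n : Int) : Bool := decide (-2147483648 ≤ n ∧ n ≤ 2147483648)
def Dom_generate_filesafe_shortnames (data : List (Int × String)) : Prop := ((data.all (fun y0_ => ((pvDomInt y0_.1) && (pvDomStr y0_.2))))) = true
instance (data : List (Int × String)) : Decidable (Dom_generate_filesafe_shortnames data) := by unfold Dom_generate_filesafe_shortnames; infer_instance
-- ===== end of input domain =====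

-- B replaces A's on-the-fly collision detection (reverse map + ambiguous set + in-place
-- mutation) by sort-by-suffix, an adjacent-duplicate scan, and a rebuilding comprehension.

-- ===== PORT A =====

-- str.maketrans({x: "_" for x in '/\\?%*:|"<> '}): each listed character maps to '_'.
def pvSanitizeChar (c : Char) : Char :=
  if c = '/' ∨ c = '\\' ∨ c = '?' ∨ c = '%' ∨ c = '*' ∨ c = ':' ∨ c = '|' ∨ c = '"' ∨ c = '<' ∨ c = '>' ∨ c = ' '
  then '_' else c

-- name.translate(FILENAME_SANITIZE_MAP): exact, the table maps single chars to '_'.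
def sanitize_filename (name : String) : String := String.ofList (name.toList.map pvSanitizeChar)

-- Python string concatenation a + b (exact; done on the char lists so the kernel reduces it).
def pvCat (a b : String) : String := String.ofList (a.toList ++ b.toList)

def generate_filesafe_shortnames (data : List (Int × String)) : List (Int × String) :=
  -- result = {id_: sanitize_filename(shortname) for id_, shortname in data.items()}
  let result : PySem.Dict Int String :=
    data.foldl (fun d p => d.insert p.1 (sanitize_filename p.2)) PySem.Dict.empty
  -- for id_, suffix in result.items(): if suffix in reverse_result: add both; reverse_result[suffix] = id_
  let scan :=
    result.items.foldl (fun st p =>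
      let amb := match st.1.get? p.2 with
        | some j => PySem.Set.add (PySem.Set.add st.2 j) p.1
        | none => st.2
      (st.1.insert p.2 p.1, amb))
      ((PySem.Dict.empty : PySem.Dict String Int), (PySem.Set.empty : PySem.Set Int))
  -- for id_ in ambiguous_ids: result[id_] += f"_{id_}"   (id_ is always a key, so getD is exact)
  let final := scan.2.foldl
    (fun r i => r.insert i (pvCat (r.getD i "") (pvCat "_" (PySem.Int.toStr i)))) result
  final.items

-- ===== PORT B =====
def generate_filesafe_shortnames_alt (data : List (Int × String)) : List (Int × String) :=
  -- items = [(id_, shortname.translate(...)) for id_, shortname in data.items()]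
  -- (data is a dict, so the pair list is the dict built from data, item by item)
  let itemsD : PySem.Dict Int String :=
    data.foldl (fun d p => d.insert p.1 (sanitize_filename p.2)) PySem.Dict.empty
  let items := itemsD.items
  -- order = sorted(items, key=lambda p: p[1])
  let order := PySem.List.sorted items (fun p => p.2) false
  -- for (i1, s1), (i2, s2) in zip(order, order[1:]): if s1 == s2: add both
  let dup := (order.zip (order.drop 1)).foldl
    (fun st pq => if pq.1.2 = pq.2.2 then PySem.Set.add (PySem.Set.add st pq.1.1) pq.2.1 else st)
    (PySem.Set.empty : PySem.Set Int)
  -- {id_: f"{suffix}_{id_}" if id_ in dup_ids else suffix for id_, suffix in items}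
  let final := items.foldl (fun d p =>
    d.insert p.1 (if p.1 ∈ dup then pvCat p.2 (pvCat "_" (PySem.Int.toStr p.1)) else p.2))
    (PySem.Dict.empty : PySem.Dict Int String)
  final.items

-- ===== PRECONDITION & SPEC =====
def Spec_generate_filesafe_shortnames (data : List (Int × String)) (out : List (Int × String)) : Prop := out = generate_filesafe_shortnames_alt data
instance (data : List (Int × String)) (out : List (Int × String)) : Decidable (Spec_generate_filesafe_shortnames data out) := by unfold Spec_generate_filesafe_shortnames; infer_instance

-- ===== CLAIM (what is proved, stated in full; the proofs are below) =====
def Claim_equal_generate_filesafe_shortnames : Prop := ∀ (data : List (Int × String)), Dom_generate_filesafe_shortnames data → Spec_generate_filesafe_shortnames data (generate_filesafe_shortnames data)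

-- ===== LEMMAS AND PROOFS =====

-- two distinct ids sharing a suffix make that suffix's count at least 2
theorem pvCountTwo {α β : Type} [DecidableEq α] [DecidableEq β] (l : List (α × β)) (a b : α) (s : β)
    (h1 : (a, s) ∈ l) (h2 : (b, s) ∈ l) (hab : a ≠ b) : 2 ≤ (l.map Prod.snd).count s := by
  induction l with
  | nil => cases h1
  | cons hd tl ih =>
    rcases List.mem_cons.mp h1 with h1' | h1' <;> rcases List.mem_cons.mp h2 with h2' | h2'
    · exact absurd (by rw [← h1'] at h2'; exact congrArg Prod.fst h2'.symm) hab
    · rw [← h1']; simp; exact ⟨b, h2'⟩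
    · rw [← h2']; simp; exact ⟨a, h1'⟩
    · have h3 := ih h1' h2'
      have h4 : (tl.map Prod.snd).count s ≤ ((hd :: tl).map Prod.snd).count s := by
        simp [List.count_cons]
      omega

-- appending one pair bumps exactly its suffix's count
theorem pvCntAppend (P : List (Int × String)) (i : Int) (su s : String) :
    ((P ++ [(i, su)]).map Prod.snd).count s
      = (P.map Prod.snd).count s + if s = su then 1 else 0 := by
  simp [List.count_append, List.count_singleton]
  split_ifs <;> simp_all

-- A's scan loop invariant: amb collects exactly the ids whose suffix occurs at least twice
theorem pvScanInv (l P : List (Int × String)) (rev : PySem.Dict String Int) (amb : PySem.Set Int)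
    (hrev : ∀ s j, rev.get? s = some j → (j, s) ∈ P)
    (hsome : ∀ s, (rev.get? s).isSome ↔ s ∈ P.map Prod.snd)
    (hamb : ∀ j, j ∈ amb ↔ ∃ s, (j, s) ∈ P ∧ 2 ≤ (P.map Prod.snd).count s)
    (hambnd : amb.Nodup) :
    (∀ j, j ∈ (l.foldl (fun st p =>
        let amb := match st.1.get? p.2 with
          | some j => PySem.Set.add (PySem.Set.add st.2 j) p.1
          | none => st.2
        (st.1.insert p.2 p.1, amb)) (rev, amb)).2 ↔
        ∃ s, (j, s) ∈ P ++ l ∧ 2 ≤ ((P ++ l).map Prod.snd).count s) ∧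
    (l.foldl (fun st p =>
        let amb := match st.1.get? p.2 with
          | some j => PySem.Set.add (PySem.Set.add st.2 j) p.1
          | none => st.2
        (st.1.insert p.2 p.1, amb)) (rev, amb)).2.Nodup := by
  induction l generalizing P rev amb with
  | nil => simpa using ⟨hamb, hambnd⟩
  | cons p t ih =>
    obtain ⟨i, su⟩ := p
    rw [List.foldl_cons]
    have hPP : ∀ (x : Int × String), x ∈ P ++ (i, su) :: t ↔ x ∈ (P ++ [(i, su)]) ++ t := by
      intro x; simp
    have hcnteq : ∀ s, (((P ++ [(i, su)]) ++ t).map Prod.snd).count s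
        = ((P ++ (i, su) :: t).map Prod.snd).count s := by
      intro s; simp [List.count_append]
    by_cases hgn : rev.get? su = none
    · have hg := hgn
      have hsu : su ∉ P.map Prod.snd := by
        intro h; have := (hsome su).mpr h; rw [hg] at this; simp at this
      have hcnt0 : (P.map Prod.snd).count su = 0 := List.count_eq_zero_of_not_mem hsu
      simp only [hg]
      have main := ih (P ++ [(i, su)]) (rev.insert su i) amb
        (by
          intro s j hj
          rw [PySem.Dict.get?_insert] at hj
          split at hj
          · rename_i hs; subst hs; simp at hj; subst hj; simp
          · exact List.mem_append_left _ (hrev s j hj))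
        (by
          intro s
          rw [PySem.Dict.get?_insert]
          split
          · rename_i hs; subst hs; simp
          · rename_i hs; rw [hsome s]; simp [hs])
        (by
          intro j
          rw [hamb j]
          constructor
          · rintro ⟨s, hm, hc⟩
            exact ⟨s, List.mem_append_left _ hm, by
              rw [pvCntAppend]
              split <;> omega⟩
          · rintro ⟨s, hm, hc⟩
            rcases List.mem_append.mp hm with hm2 | hm2
            · refine ⟨s, hm2, ?_⟩
              have hne : s ≠ su := by
                intro h; subst h
                exact hsu (List.mem_map.mpr ⟨(j, s), hm2, rfl⟩)
              rw [pvCntAppend, if_neg hne] at hc; omega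
            · simp at hm2
              obtain ⟨h1, h2⟩ := hm2; subst h1; subst h2
              rw [pvCntAppend, if_pos rfl, hcnt0] at hc; omega)
        hambnd
      constructor
      · intro j; rw [(main.1 j)]
        constructor
        · rintro ⟨s, hm, hc⟩; exact ⟨s, (hPP _).mpr hm, by rw [← hcnteq]; exact hc⟩
        · rintro ⟨s, hm, hc⟩; exact ⟨s, (hPP _).mp hm, by rw [hcnteq]; exact hc⟩
      · exact main.2
    · obtain ⟨j0, hg⟩ := Option.ne_none_iff_exists'.mp hgn
      have hj0 : (j0, su) ∈ P := hrev su j0 hg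
      have hsu : su ∈ P.map Prod.snd := List.mem_map.mpr ⟨(j0, su), hj0, rfl⟩
      have hcnt1 : 1 ≤ (P.map Prod.snd).count su := List.count_pos_iff.mpr hsu
      simp only [hg]
      have main := ih (P ++ [(i, su)]) (rev.insert su i) (PySem.Set.add (PySem.Set.add amb j0) i)
        (by
          intro s j hj
          rw [PySem.Dict.get?_insert] at hj
          split at hj
          · rename_i hs; subst hs; simp at hj; subst hj; simp
          · exact List.mem_append_left _ (hrev s j hj))
        (by
          intro s
          rw [PySem.Dict.get?_insert]
          split
          · rename_i hs; subst hs; simp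
          · rename_i hs; rw [hsome s]; simp [hs])
        (by
          intro j
          rw [PySem.Set.mem_add, PySem.Set.mem_add, hamb j]
          constructor
          · rintro ((⟨s, hm, hc⟩ | hj) | hj)
            · exact ⟨s, List.mem_append_left _ hm, by rw [pvCntAppend]; split <;> omega⟩
            · subst hj
              exact ⟨su, List.mem_append_left _ hj0, by rw [pvCntAppend, if_pos rfl]; omega⟩
            · subst hj
              exact ⟨su, List.mem_append_right _ (by simp), by rw [pvCntAppend, if_pos rfl]; omega⟩
          · rintro ⟨s, hm, hc⟩
            rcases List.mem_append.mp hm with hm2 | hm2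
            · by_cases hs : s = su
              · subst hs
                by_cases h2c : 2 ≤ (P.map Prod.snd).count s
                · exact Or.inl (Or.inl ⟨s, hm2, h2c⟩)
                · by_cases hjj : j = j0
                  · exact Or.inl (Or.inr hjj)
                  · exact absurd (pvCountTwo P j j0 s hm2 hj0 hjj) h2c
              · rw [pvCntAppend, if_neg hs] at hc
                exact Or.inl (Or.inl ⟨s, hm2, by omega⟩)
            · simp at hm2
              exact Or.inr hm2.1)
        (PySem.Set.nodup_add _ _ (PySem.Set.nodup_add _ _ hambnd))
      constructor
      · intro j; rw [(main.1 j)]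
        constructor
        · rintro ⟨s, hm, hc⟩; exact ⟨s, (hPP _).mpr hm, by rw [← hcnteq]; exact hc⟩
        · rintro ⟨s, hm, hc⟩; exact ⟨s, (hPP _).mp hm, by rw [hcnteq]; exact hc⟩
      · exact main.2

-- A's mutation loop rewrites exactly the entries whose id is in amb, in place
theorem pvApplyAmb (amb : List Int) (d : PySem.Dict Int String)
    (hk : d.keys.Nodup) (hnd : amb.Nodup) (hsub : ∀ i ∈ amb, i ∈ d.keys) :
    (amb.foldl (fun r i => r.insert i (pvCat (r.getD i "") (pvCat "_" (PySem.Int.toStr i)))) d).items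
      = d.items.map (fun p => if p.1 ∈ amb then (p.1, pvCat p.2 (pvCat "_" (PySem.Int.toStr p.1))) else p) := by
  induction amb generalizing d with
  | nil => simp
  | cons i rest ih =>
    have hci : d.contains i = true := (PySem.Dict.contains_iff_mem_keys d i).mpr (hsub i (by simp))
    rw [List.foldl_cons]
    have hkeys : (d.insert i (pvCat (d.getD i "") (pvCat "_" (PySem.Int.toStr i)))).keys = d.keys :=
      PySem.Dict.keys_insert_of_contains d _ hci
    rw [ih _ (by rw [hkeys]; exact hk) (List.Nodup.of_cons hnd)
        (by intro j hj; rw [hkeys]; exact hsub j (by simp [hj]))]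
    rw [PySem.Dict.items_insert_of_contains d _ hci]
    rw [List.map_map]
    apply List.map_congr_left
    intro p hp
    by_cases hpi : p.1 = i
    · have hv : d.getD i "" = p.2 := by
        have : (i, p.2) ∈ d.items := by rw [← hpi]; exact hp
        exact PySem.Dict.getD_of_mem_items d this hk ""
      have hir : i ∉ rest := (List.nodup_cons.mp hnd).1
      simp [Function.comp, hpi, hir, hv]
    · have : (p.1 == i) = false := by simp [hpi]
      simp [Function.comp, this, hpi]

-- membership in B's adjacent-pair fold: exactly the endpoints of equal-suffix adjacent pairs
theorem pvMemDupFold (ps : List ((Int × String) × (Int × String))) (s0 : PySem.Set Int) (i : Int) :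
    i ∈ ps.foldl (fun st pq => if pq.1.2 = pq.2.2 then PySem.Set.add (PySem.Set.add st pq.1.1) pq.2.1 else st) s0
      ↔ i ∈ s0 ∨ ∃ pq ∈ ps, pq.1.2 = pq.2.2 ∧ (i = pq.1.1 ∨ i = pq.2.1) := by
  induction ps generalizing s0 with
  | nil => simp
  | cons pq t ih =>
    rw [List.foldl_cons]
    by_cases h : pq.1.2 = pq.2.2
    · rw [if_pos h, ih]
      simp only [PySem.Set.mem_add, List.mem_cons]
      constructor
      · rintro (((hs | h1) | h2) | ⟨q, hq, he, hi⟩)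
        · exact Or.inl hs
        · exact Or.inr ⟨pq, Or.inl rfl, h, Or.inl h1⟩
        · exact Or.inr ⟨pq, Or.inl rfl, h, Or.inr h2⟩
        · exact Or.inr ⟨q, Or.inr hq, he, hi⟩
      · rintro (hs | ⟨q, (rfl | hq), he, hi⟩)
        · exact Or.inl (Or.inl (Or.inl hs))
        · rcases hi with h1 | h2
          · exact Or.inl (Or.inl (Or.inr h1))
          · exact Or.inl (Or.inr h2)
        · exact Or.inr ⟨q, hq, he, hi⟩
    · rw [if_neg h, ih]
      constructor
      · rintro (hs | ⟨q, hq, he, hi⟩)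
        · exact Or.inl hs
        · exact Or.inr ⟨q, List.mem_cons_of_mem _ hq, he, hi⟩
      · rintro (hs | ⟨q, hq, he, hi⟩)
        · exact Or.inl hs
        · rcases List.mem_cons.mp hq with rfl | hq'
          · exact absurd he h
          · exact Or.inr ⟨q, hq', he, hi⟩

-- an adjacent pair of a list splits it as pre ++ [fst, snd] ++ suf
theorem pvZipAdj {α : Type} (l : List α) (pq : α × α) (h : pq ∈ l.zip l.tail) :
    ∃ pre suf, l = pre ++ pq.1 :: pq.2 :: suf := by
  induction l with
  | nil => simp at h
  | cons a t ih =>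
    cases t with
    | nil => simp at h
    | cons b t2 =>
      rw [List.tail_cons, List.zip_cons_cons] at h
      rcases List.mem_cons.mp h with rfl | h'
      · exact ⟨[], t2, rfl⟩
      · obtain ⟨pre, suf, hps⟩ := ih (by rw [List.tail_cons]; exact h')
        exact ⟨a :: pre, suf, by rw [List.cons_append, ← hps]⟩

-- an equal-suffix adjacent pair yields an id with a suffix of count ≥ 2
theorem pvAdjCount (l : List (Int × String)) (i : Int)
    (h : ∃ pq ∈ l.zip l.tail, pq.1.2 = pq.2.2 ∧ (i = pq.1.1 ∨ i = pq.2.1)) :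
    ∃ s, (i, s) ∈ l ∧ 2 ≤ (l.map Prod.snd).count s := by
  obtain ⟨pq, hmem, he, hi⟩ := h
  obtain ⟨pre, suf, rfl⟩ := pvZipAdj l pq hmem
  have hc : 2 ≤ ((pre ++ pq.1 :: pq.2 :: suf).map Prod.snd).count pq.1.2 := by
    simp [List.count_append, he]
    omega
  rcases hi with rfl | rfl
  · exact ⟨pq.1.2, by simp, hc⟩
  · exact ⟨pq.2.2, by simp, he ▸ hc⟩

-- in a suffix-sorted list, a suffix of count ≥ 2 shows up as an equal adjacent pair
theorem pvSortedAdj (l : List (Int × String))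
    (hs : l.Pairwise (fun a b => a.2 ≤ b.2)) (i : Int) (s : String)
    (hm : (i, s) ∈ l) (hc : 2 ≤ (l.map Prod.snd).count s) :
    ∃ pq ∈ l.zip l.tail, pq.1.2 = pq.2.2 ∧ (i = pq.1.1 ∨ i = pq.2.1) := by
  induction l with
  | nil => simp at hm
  | cons p t ih =>
    cases t with
    | nil =>
      simp [List.count_cons] at hc
      split_ifs at hc <;> omega
    | cons q t2 =>
      have hzip : (p :: q :: t2).zip (p :: q :: t2).tail
          = (p, q) :: (q :: t2).zip (q :: t2).tail := by simp
      have hpair := List.pairwise_cons.mp hs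
      have hpq : p.2 ≤ q.2 := hpair.1 q (by simp)
      have htps : (q :: t2).Pairwise (fun a b : Int × String => a.2 ≤ b.2) := hpair.2
      rcases List.mem_cons.mp hm with hp | hint
      · -- (i, s) = p
        have hps : p.2 = s := by rw [← hp]
        have hpi : i = p.1 := by rw [← hp]
        have hcc : (((p :: q :: t2)).map Prod.snd).count s
            = (((q :: t2)).map Prod.snd).count s + 1 := by
          simp [List.count_cons, hps]
        have hct : 1 ≤ (((q :: t2)).map Prod.snd).count s := by omega
        have hsmem : s ∈ ((q :: t2)).map Prod.snd := List.count_pos_iff.mp (by omega)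
        obtain ⟨r, hr, hrs⟩ := List.mem_map.mp hsmem
        have hq2 : q.2 = s := by
          rcases List.mem_cons.mp hr with rfl | hr2
          · exact hrs
          · have h1 : q.2 ≤ r.2 := (List.pairwise_cons.mp htps).1 r hr2
            rw [hrs] at h1
            have h2 : s ≤ q.2 := hps ▸ hpq
            exact le_antisymm h1 h2
        exact ⟨(p, q), by rw [hzip]; simp, by rw [hps, hq2], Or.inl hpi⟩
      · -- (i, s) ∈ q :: t2
        by_cases h2t : 2 ≤ (((q :: t2)).map Prod.snd).count s
        · obtain ⟨pq, hpq', he, hi⟩ := ih htps hint h2t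
          exact ⟨pq, by rw [hzip]; exact List.mem_cons_of_mem _ hpq', he, hi⟩
        · have hct1 : (((q :: t2)).map Prod.snd).count s = 1 := by
            have : 1 ≤ (((q :: t2)).map Prod.snd).count s :=
              List.count_pos_iff.mpr (List.mem_map.mpr ⟨(i, s), hint, rfl⟩)
            omega
          have hps : p.2 = s := by
            by_contra hne
            have hcc : (((p :: q :: t2)).map Prod.snd).count s
                = (((q :: t2)).map Prod.snd).count s := by
              simp [List.count_cons, hne]
            rw [hcc, hct1] at hc
            omega
          rcases List.mem_cons.mp hint with hq | hin2
          · -- (i, s) = q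
            exact ⟨(p, q), by rw [hzip]; simp, by rw [hps, ← hq], Or.inr (by rw [← hq])⟩
          · -- (i, s) ∈ t2 : then q.2 = s too and count in q::t2 ≥ 2, contradiction
            exfalso
            have h1 : q.2 ≤ s := by
              have := (List.pairwise_cons.mp htps).1 (i, s) hin2
              exact this
            have h2 : s ≤ q.2 := hps ▸ hpq
            have hq2 : q.2 = s := le_antisymm h1 h2
            have hmem2 : s ∈ (t2.map Prod.snd) := List.mem_map.mpr ⟨(i, s), hin2, rfl⟩
            have h3 := List.count_pos_iff.mpr hmem2
            have hcc2 : (((q :: t2)).map Prod.snd).count s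
                = (t2.map Prod.snd).count s + 1 := by
              simp [hq2]
            omega

-- ===== VERDICT (by name: the statement is the Claim_ definition above) =====
theorem generate_filesafe_shortnames_spec : Claim_equal_generate_filesafe_shortnames := by
  intro data _
  unfold Spec_generate_filesafe_shortnames generate_filesafe_shortnames generate_filesafe_shortnames_alt
  simp only []
  set R : PySem.Dict Int String :=
    data.foldl (fun d p => d.insert p.1 (sanitize_filename p.2)) PySem.Dict.empty with hRdef
  have hknd : R.keys.Nodup := by
    exact PySem.Dict.nodup_keys_foldl_insert_key data (fun p => p.1)
      (fun _ p => sanitize_filename p.2) PySem.Dict.empty (by simp)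
  have hfstnd : (R.items.map Prod.fst).Nodup := hknd
  have hscan := pvScanInv R.items [] PySem.Dict.empty PySem.Set.empty
    (by intro s j h; simp [PySem.Dict.get?_empty] at h)
    (by intro s; simp [PySem.Dict.get?_empty])
    (by intro j; simp)
    (by simp)
  obtain ⟨hmem, hand⟩ := hscan
  simp only [List.nil_append] at hmem
  have hsub : ∀ j ∈ (R.items.foldl (fun st p =>
      let amb := match st.1.get? p.2 with
        | some j => PySem.Set.add (PySem.Set.add st.2 j) p.1
        | none => st.2
      (st.1.insert p.2 p.1, amb))
      ((PySem.Dict.empty : PySem.Dict String Int), (PySem.Set.empty : PySem.Set Int))).2,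
      j ∈ R.keys := by
    intro j hj
    obtain ⟨s, hm, _⟩ := (hmem j).mp hj
    exact PySem.Dict.mem_keys_of_mem_items R hm
  rw [pvApplyAmb _ R hknd hand hsub]
  -- B side: the sorted order
  set O := PySem.List.sorted R.items (fun p => p.2) false with hOdef
  have hperm : O.Perm R.items := PySem.List.sorted_perm R.items (fun p => p.2) false
  have hOsorted : O.Pairwise (fun a b : Int × String => a.2 ≤ b.2) :=
    PySem.List.sorted_pairwise R.items (fun p => p.2)
  have hcntO : ∀ s, (O.map Prod.snd).count s = (R.items.map Prod.snd).count s := by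
    intro s; exact (hperm.map Prod.snd).count_eq s
  have hdup : ∀ i, (i ∈ (O.zip (O.drop 1)).foldl
      (fun st pq => if pq.1.2 = pq.2.2 then PySem.Set.add (PySem.Set.add st pq.1.1) pq.2.1 else st)
      (PySem.Set.empty : PySem.Set Int))
      ↔ ∃ s, (i, s) ∈ R.items ∧ 2 ≤ (R.items.map Prod.snd).count s := by
    intro i
    rw [pvMemDupFold]
    have hdrop : O.drop 1 = O.tail := List.drop_one
    rw [hdrop]
    constructor
    · rintro (hs | hadj)
      · simp at hs
      · obtain ⟨s, hm, hc⟩ := pvAdjCount O i hadj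
        exact ⟨s, hperm.mem_iff.mp hm, by rw [← hcntO]; exact hc⟩
    · rintro ⟨s, hm, hc⟩
      exact Or.inr (pvSortedAdj O hOsorted i s (hperm.mem_iff.mpr hm) (by rw [hcntO]; exact hc))
  have hB : (R.items.foldl (fun d p =>
      d.insert p.1 (if p.1 ∈ (O.zip (O.drop 1)).foldl
        (fun st pq => if pq.1.2 = pq.2.2 then PySem.Set.add (PySem.Set.add st pq.1.1) pq.2.1 else st)
        (PySem.Set.empty : PySem.Set Int)
        then pvCat p.2 (pvCat "_" (PySem.Int.toStr p.1)) else p.2))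
      PySem.Dict.empty).items
      = R.items.map (fun p => (p.1,
          if p.1 ∈ (O.zip (O.drop 1)).foldl
            (fun st pq => if pq.1.2 = pq.2.2 then PySem.Set.add (PySem.Set.add st pq.1.1) pq.2.1 else st)
            (PySem.Set.empty : PySem.Set Int)
          then pvCat p.2 (pvCat "_" (PySem.Int.toStr p.1)) else p.2)) := by
    simpa using PySem.Dict.items_foldl_insert_fresh R.items (fun p => p.1)
      (fun p => if p.1 ∈ (O.zip (O.drop 1)).foldl
        (fun st pq => if pq.1.2 = pq.2.2 then PySem.Set.add (PySem.Set.add st pq.1.1) pq.2.1 else st)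
        (PySem.Set.empty : PySem.Set Int)
        then pvCat p.2 (pvCat "_" (PySem.Int.toStr p.1)) else p.2)
      PySem.Dict.empty (by intro a _; simp) hfstnd
  refine Eq.trans (List.map_congr_left ?_) hB.symm
  intro p hp
  have hiff : p.1 ∈ (R.items.foldl (fun st p =>
      let amb := match st.1.get? p.2 with
        | some j => PySem.Set.add (PySem.Set.add st.2 j) p.1
        | none => st.2
      (st.1.insert p.2 p.1, amb))
      ((PySem.Dict.empty : PySem.Dict String Int), (PySem.Set.empty : PySem.Set Int))).2
      ↔ 2 ≤ (R.items.map Prod.snd).count p.2 := by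
    rw [hmem p.1]
    constructor
    · rintro ⟨s, hm, hc⟩
      have : (p.1, s) = p := List.inj_on_of_nodup_map hfstnd hm hp rfl
      rw [← this] at hp
      have hs : s = p.2 := by
        have := congrArg Prod.snd this
        simpa using this
      rw [← hs]; exact hc
    · intro hc
      exact ⟨p.2, by simpa using hp, hc⟩
  have hiffB : (p.1 ∈ (O.zip (O.drop 1)).foldl
      (fun st pq => if pq.1.2 = pq.2.2 then PySem.Set.add (PySem.Set.add st pq.1.1) pq.2.1 else st)
      (PySem.Set.empty : PySem.Set Int))
      ↔ 2 ≤ (R.items.map Prod.snd).count p.2 := by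
    rw [hdup p.1]
    constructor
    · rintro ⟨s, hm, hc⟩
      have : (p.1, s) = p := List.inj_on_of_nodup_map hfstnd hm hp rfl
      have hs : s = p.2 := by
        have := congrArg Prod.snd this
        simpa using this
      rw [← hs]; exact hc
    · intro hc
      exact ⟨p.2, by simpa using hp, hc⟩
  by_cases hc2 : 2 ≤ (R.items.map Prod.snd).count p.2
  · rw [if_pos (hiff.mpr hc2), if_pos (hiffB.mpr hc2)]
  · rw [if_neg (fun h => hc2 (hiff.mp h)), if_neg (fun h => hc2 (hiffB.mp h))]
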